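-- pv_equiv track=rewrite | github.com/modelscope/agentscope | src/agentscope/agents/system_prompt_opt_agent.py | get_all_tagged_notes
-- ===== SOURCE A (Python) =====
-- def get_all_tagged_notes(response_text: str) -> list:
--     """Get all the notes in the response text."""
--     notes = []
--     start_tag = "[prompt_note]"
--     end_tag = "[/prompt_note]"
--     start_index = response_text.find(start_tag)
--     while start_index != -1:
--         end_index = response_text.find(
--             end_tag,
--             start_index + len(start_tag),
--         )
--         if end_index != -1:
--             note = response_text[start_index + len(start_tag) : end_index]
--             notes.append(note)
--             start_index = response_text.find(
--                 start_tag,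
--                 end_index + len(end_tag),
--             )
--         else:
--             break
--     return notes
-- ===== SOURCE B (Python) =====
-- def get_all_tagged_notes(response_text: str) -> list:
--     """Get all the notes in the response text."""
--     start_tag = "[prompt_note]"
--     end_tag = "[/prompt_note]"
--     notes = []
--     for piece in response_text.split(end_tag)[:-1]:
--         idx = piece.find(start_tag)
--         if idx != -1:
--             notes.append(piece[idx + len(start_tag):])
--     return notes
-- ===== Notes on version B (the rewrite author's own statement) =====
-- stated objective: idiomatic
-- what changed: B has no scanning loop or position state at all: it splits the text on the closing tag in one pass and then, for every piece except the last, emits the text after the first opening tag in that piece (correct because the tags cannot overlap, so the nearest closing tag after a start is exactly the boundary terminating its piece).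
import Mathlib
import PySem

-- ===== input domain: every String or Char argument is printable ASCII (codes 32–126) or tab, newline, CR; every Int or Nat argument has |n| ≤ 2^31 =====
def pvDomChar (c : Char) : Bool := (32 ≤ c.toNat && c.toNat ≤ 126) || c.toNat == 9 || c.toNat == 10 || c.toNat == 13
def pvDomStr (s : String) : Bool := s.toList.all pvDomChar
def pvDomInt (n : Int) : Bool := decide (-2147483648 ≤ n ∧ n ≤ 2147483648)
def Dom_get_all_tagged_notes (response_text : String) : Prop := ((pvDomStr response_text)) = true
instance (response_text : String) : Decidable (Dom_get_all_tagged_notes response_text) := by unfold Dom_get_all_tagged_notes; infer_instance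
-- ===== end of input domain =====

-- B replaces A's stateful find/while scan by two stages: split the text on the closing tag,
-- then for every piece but the last emit the text after the first opening tag in that piece
-- (correct because the two tags cannot overlap). Same values, same cost.

-- ===== PORT A =====
def pvStartTag : List Char := "[prompt_note]".toList
def pvEndTag : List Char := "[/prompt_note]".toList

-- the while loop of A: `start` is the current start_index; fuel only makes the loop total
-- (each iteration moves start_index forward, so `length + 1` fuel is never exhausted)
def pvLoopA (cs : List Char) (fuel : Nat) (start : Int) : List (List Char) :=
  match fuel with
  | 0 => []
  | fuel + 1 =>
    if start = -1 then []
    else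
      let e := PySem.Chars.findFrom cs pvEndTag (start + (pvStartTag.length : Int)) none
      if e = -1 then []
      else
        PySem.Chars.slice cs (some (start + (pvStartTag.length : Int))) (some e)
          :: pvLoopA cs fuel
              (PySem.Chars.findFrom cs pvStartTag (e + (pvEndTag.length : Int)) none)

def get_all_tagged_notes (response_text : String) : List String :=
  (pvLoopA response_text.toList (response_text.toList.length + 1)
      (PySem.Chars.find response_text.toList pvStartTag)).map String.ofList

-- ===== PORT B =====
-- Source B: for piece in response_text.split(end_tag)[:-1]: if piece.find(start_tag) != -1: append piece[idx+len(start_tag):]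
def get_all_tagged_notes_alt (response_text : String) : List String :=
  (((PySem.Chars.splitOn response_text.toList pvEndTag).dropLast).foldl
    (fun notes piece =>
      let idx := PySem.Chars.find piece pvStartTag
      if idx ≠ -1 then
        notes ++ [PySem.Chars.slice piece (some (idx + (pvStartTag.length : Int))) none]
      else notes)
    []).map String.ofList

-- ===== PRECONDITION & SPEC =====
def Spec_get_all_tagged_notes (response_text : String) (out : List String) : Prop := out = get_all_tagged_notes_alt response_text
instance (response_text : String) (out : List String) : Decidable (Spec_get_all_tagged_notes response_text out) := by unfold Spec_get_all_tagged_notes; infer_instance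

-- ===== CLAIM (what is proved, stated in full; the proofs are below) =====
def Claim_equal_get_all_tagged_notes : Prop := ∀ (response_text : String), Dom_get_all_tagged_notes response_text → Spec_get_all_tagged_notes response_text (get_all_tagged_notes response_text)

-- ===== LEMMAS AND PROOFS =====

-- exact port of str.partition(sep) (proof-side helper): (head, sep, tail) at the first occurrence, else (s, '', '')
def pvPartition (cs sep : List Char) : List Char × List Char × List Char :=
  let i := PySem.Chars.find cs sep
  if i = -1 then (cs, [], [])
  else (cs.take i.toNat, sep, cs.drop (i.toNat + sep.length))

theorem pvPartition_rest_len (cs sep : List Char) (h : (pvPartition cs sep).2.1 ≠ []) :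
    (pvPartition cs sep).2.2.length + sep.length ≤ cs.length := by
  unfold pvPartition at *
  by_cases hi : PySem.Chars.find cs sep = -1
  · simp [hi] at h
  · have h0 : (0:Int) ≤ PySem.Chars.find cs sep := by
      have := PySem.Chars.neg_one_le_find cs sep
      omega
    have hsp := (PySem.Chars.find_spec (s := cs) (sub := sep) h0).1
    have hlen := hsp.length_le
    simp [List.length_drop] at hlen ⊢
    simp [hi]
    omega

-- A's loop expressed on the remaining suffix (proof-side)
def pvLoopB (cs : List Char) : List (List Char) :=
  let p1 := pvPartition cs pvStartTag
  if p1.2.1 = [] then []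
  else
    let p2 := pvPartition p1.2.2 pvEndTag
    if p2.2.1 = [] then []
    else p2.1 :: pvLoopB p2.2.2
termination_by cs.length
decreasing_by
  have h1 := pvPartition_rest_len cs pvStartTag (by assumption)
  have h2 := pvPartition_rest_len (pvPartition cs pvStartTag).2.2 pvEndTag (by assumption)
  have e1 : pvStartTag.length = 13 := by decide
  have e2 : pvEndTag.length = 14 := by decide
  omega

theorem loopA_eq_loopB (fuel : Nat) : ∀ (cs : List Char) (k : Nat), k ≤ cs.length →
    cs.length - k < fuel →
    pvLoopA cs fuel (PySem.Chars.findFrom cs pvStartTag (k : Int) none) = pvLoopB (cs.drop k) := by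
  induction fuel with
  | zero => intro cs k hk hf; omega
  | succ fuel ih =>
    intro cs k hk hf
    rw [PySem.Chars.findFrom_natCast cs pvStartTag k hk, pvLoopB]
    by_cases h1 : PySem.Chars.find (cs.drop k) pvStartTag = -1
    · simp [h1, pvLoopA, pvPartition]
    · have hi0 : 0 ≤ PySem.Chars.find (cs.drop k) pvStartTag := by
        have := PySem.Chars.neg_one_le_find (cs.drop k) pvStartTag
        omega
      obtain ⟨n, hn⟩ : ∃ m : Nat, PySem.Chars.find (cs.drop k) pvStartTag = (m : Int) :=
        ⟨(PySem.Chars.find (cs.drop k) pvStartTag).toNat, (Int.toNat_of_nonneg hi0).symm⟩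
      have hpre := (PySem.Chars.find_spec (s := cs.drop k) (sub := pvStartTag) hi0).1
      rw [hn] at hpre
      have hlen1 : n + 13 ≤ cs.length - k := by
        have := hpre.length_le
        have e1 : pvStartTag.length = 13 := by decide
        simp [List.length_drop, e1] at this
        omega
      have hk' : k + n + 13 ≤ cs.length := by omega
      have hcast1 : (k : Int) + (n : Int) + (pvStartTag.length : Int) = ((k + n + 13 : Nat) : Int) := by
        have e1 : pvStartTag.length = 13 := by decide
        rw [e1]; push_cast; ring
      have hBpart1 : pvPartition (cs.drop k) pvStartTag =
          ((cs.drop k).take n, pvStartTag, cs.drop (k + n + 13)) := by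
        unfold pvPartition
        rw [hn, if_neg (by omega)]
        have e1 : pvStartTag.length = 13 := by decide
        simp [e1, List.drop_drop]
        omega
      rw [hn]
      simp only [if_neg (show ¬ ((n : Int) = -1) by omega)]
      simp only [pvLoopA]
      simp only [if_neg (show ¬ ((k : Int) + (n : Int) = -1) by omega)]
      simp only [hcast1]
      rw [PySem.Chars.findFrom_natCast cs pvEndTag (k + n + 13) hk']
      simp only [hBpart1]
      simp only [if_neg (show ¬ (pvStartTag = ([] : List Char)) by decide)]
      by_cases h2 : PySem.Chars.find (cs.drop (k + n + 13)) pvEndTag = -1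
      · simp [h2, pvPartition]
      · have hj0 : 0 ≤ PySem.Chars.find (cs.drop (k + n + 13)) pvEndTag := by
          have := PySem.Chars.neg_one_le_find (cs.drop (k + n + 13)) pvEndTag
          omega
        obtain ⟨m, hm⟩ : ∃ m' : Nat, PySem.Chars.find (cs.drop (k + n + 13)) pvEndTag = (m' : Int) :=
          ⟨(PySem.Chars.find (cs.drop (k + n + 13)) pvEndTag).toNat, (Int.toNat_of_nonneg hj0).symm⟩
        have hpre2 := (PySem.Chars.find_spec (s := cs.drop (k + n + 13)) (sub := pvEndTag) hj0).1
        rw [hm] at hpre2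
        have hlen2 : m + 14 ≤ cs.length - (k + n + 13) := by
          have := hpre2.length_le
          have e2 : pvEndTag.length = 14 := by decide
          simp [List.length_drop, e2] at this
          omega
        have hBpart2 : pvPartition (cs.drop (k + n + 13)) pvEndTag =
            ((cs.drop (k + n + 13)).take m, pvEndTag, cs.drop (k + n + 13 + m + 14)) := by
          unfold pvPartition
          rw [hm, if_neg (by omega)]
          have e2 : pvEndTag.length = 14 := by decide
          simp [e2, List.drop_drop]
          omega
        rw [hm]
        simp only [if_neg (show ¬ ((m : Int) = -1) by omega)]
        simp only [if_neg (show ¬ (((k + n + 13 : Nat) : Int) + (m : Int) = -1) by omega)]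
        simp only [hBpart2]
        simp only [if_neg (show ¬ (pvEndTag = ([] : List Char)) by decide)]
        have hnote : PySem.Chars.slice cs (some ((k + n + 13 : Nat) : Int))
            (some (((k + n + 13 : Nat) : Int) + (m : Int))) = (cs.drop (k + n + 13)).take m := by
          have hc : ((k + n + 13 : Nat) : Int) + (m : Int) = ((k + n + 13 + m : Nat) : Int) := by
            push_cast; ring
          rw [hc, PySem.Chars.slice_eq_listSlice, PySem.List.slice_natCast]
          have : k + n + 13 + m - (k + n + 13) = m := by omega
          rw [this]
        have hcast2 : ((k + n + 13 : Nat) : Int) + (m : Int) + (pvEndTag.length : Int) =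
            ((k + n + 13 + m + 14 : Nat) : Int) := by
          have e2 : pvEndTag.length = 14 := by decide
          rw [e2]; push_cast; ring
        simp only [hnote, hcast2]
        rw [ih cs (k + n + 13 + m + 14) (by omega) (by omega)]

-- ---- generic facts about PySem.Chars.find (first-occurrence characterisation) ----

theorem pv_find_eq {l sep : List Char} {n : Nat} (h1 : sep <+: l.drop n)
    (h2 : ∀ i, i < n → ¬ sep <+: l.drop i) : PySem.Chars.find l sep = (n : Int) := by
  have hinf : sep <:+: l := h1.isInfix.trans (List.drop_suffix n l).isInfix
  have h0 : 0 ≤ PySem.Chars.find l sep := (PySem.Chars.find_nonneg_iff l sep).2 hinf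
  obtain ⟨hp, hmin⟩ := PySem.Chars.find_spec h0
  have ht : (PySem.Chars.find l sep).toNat = n := by
    rcases Nat.lt_trichotomy (PySem.Chars.find l sep).toNat n with h | h | h
    · exact absurd hp (h2 _ h)
    · exact h
    · exact absurd h1 (hmin n h)
  omega

theorem pv_find_zero {l sep : List Char} (h : sep <+: l) : PySem.Chars.find l sep = 0 := by
  have := pv_find_eq (l := l) (sep := sep) (n := 0) (by simpa using h) (by omega)
  simpa using this

theorem pv_find_none_of {l sep : List Char} (h : ∀ i, ¬ sep <+: l.drop i) :
    PySem.Chars.find l sep = -1 := by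
  rw [PySem.Chars.find_eq_neg_one_iff]
  intro hinf
  obtain ⟨j, hj⟩ := (PySem.Chars.exists_prefix_drop_iff_isIn (s := l) (sub := sep)).2
      ((PySem.Chars.isIn_iff_infix sep l).2 hinf)
  exact h j hj

theorem pv_find_cons_none {c : Char} {rest sep : List Char} (h0 : ¬ sep <+: (c :: rest))
    (h : PySem.Chars.find rest sep = -1) : PySem.Chars.find (c :: rest) sep = -1 := by
  rw [PySem.Chars.find_eq_neg_one_iff] at h
  apply pv_find_none_of
  intro i hi
  match i with
  | 0 => exact h0 (by simpa using hi)
  | j + 1 =>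
    exact h ((List.IsPrefix.isInfix (by simpa using hi)).trans (List.drop_suffix j rest).isInfix)

theorem pv_find_cons_succ {c : Char} {rest sep : List Char} {m : Nat}
    (h0 : ¬ sep <+: (c :: rest)) (h : PySem.Chars.find rest sep = (m : Int)) :
    PySem.Chars.find (c :: rest) sep = ((m + 1 : Nat) : Int) := by
  have hm0 : 0 ≤ PySem.Chars.find rest sep := by omega
  obtain ⟨hp, hmin⟩ := PySem.Chars.find_spec hm0
  rw [h] at hp hmin
  simp only [Int.toNat_natCast] at hp hmin
  apply pv_find_eq
  · simpa using hp
  · intro i hi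
    match i with
    | 0 => simpa using h0
    | j + 1 =>
      have : j < m := by omega
      simpa using hmin j this

theorem pv_find_drop {l sep : List Char} {n k : Nat} (h : PySem.Chars.find l sep = (n : Int))
    (hk : k ≤ n) : PySem.Chars.find (l.drop k) sep = ((n - k : Nat) : Int) := by
  have h0 : 0 ≤ PySem.Chars.find l sep := by omega
  obtain ⟨hp, hmin⟩ := PySem.Chars.find_spec h0
  rw [h] at hp hmin
  simp only [Int.toNat_natCast] at hp hmin
  apply pv_find_eq
  · rw [List.drop_drop]
    have : k + (n - k) = n := by omega
    rw [this]; exact hp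
  · intro i hi
    rw [List.drop_drop]
    exact hmin (k + i) (by omega)

theorem pv_find_drop_none {l sep : List Char} (k : Nat) (h : PySem.Chars.find l sep = -1) :
    PySem.Chars.find (l.drop k) sep = -1 := by
  rw [PySem.Chars.find_eq_neg_one_iff] at h ⊢
  intro hinf
  exact h (hinf.trans (List.drop_suffix k l).isInfix)

theorem pv_find_take {l sep : List Char} {n j : Nat} (h : PySem.Chars.find l sep = (n : Int))
    (hj : n + sep.length ≤ j) : PySem.Chars.find (l.take j) sep = (n : Int) := by
  have h0 : 0 ≤ PySem.Chars.find l sep := by omega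
  obtain ⟨hp, hmin⟩ := PySem.Chars.find_spec h0
  rw [h] at hp hmin
  simp only [Int.toNat_natCast] at hp hmin
  apply pv_find_eq
  · rw [List.drop_take]
    exact List.prefix_take_iff.2 ⟨hp, by omega⟩
  · intro i hi hpre
    rw [List.drop_take] at hpre
    exact hmin i hi (List.prefix_take_iff.1 hpre).1

theorem pv_find_take_none1 {l sep : List Char} (j : Nat) (h : PySem.Chars.find l sep = -1) :
    PySem.Chars.find (l.take j) sep = -1 := by
  rw [PySem.Chars.find_eq_neg_one_iff] at h ⊢
  intro hinf
  exact h (hinf.trans (List.take_prefix j l).isInfix)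

theorem pv_find_take_none2 {l sep : List Char} {n j : Nat} (hsep : sep ≠ [])
    (h : PySem.Chars.find l sep = (n : Int)) (hj : j < n + sep.length) :
    PySem.Chars.find (l.take j) sep = -1 := by
  have h0 : 0 ≤ PySem.Chars.find l sep := by omega
  obtain ⟨hp, hmin⟩ := PySem.Chars.find_spec h0
  rw [h] at hp hmin
  simp only [Int.toNat_natCast] at hp hmin
  apply pv_find_none_of
  intro i hpre
  rw [List.drop_take] at hpre
  obtain ⟨hpre', hlen⟩ := List.prefix_take_iff.1 hpre
  have hin : n ≤ i := by
    by_contra hc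
    exact hmin i (by omega) hpre'
  have hpos : 1 ≤ sep.length := List.length_pos_of_ne_nil hsep
  omega

-- ---- the two tags cannot overlap ----

theorem pv_not_both {x : List Char} (hs : pvStartTag <+: x) (he : pvEndTag <+: x) : False := by
  have h1 : pvStartTag[1] = x[1]'(by have := hs.length_le; simp [pvStartTag] at this ⊢; omega) :=
    hs.getElem (by decide)
  have h2 : pvEndTag[1] = x[1]'(by have := hs.length_le; simp [pvStartTag] at this ⊢; omega) :=
    he.getElem (by decide)
  rw [← h1] at h2
  revert h2
  decide

theorem pv_overlap1 {r : List Char} {n j : Nat} (hs : pvStartTag <+: r.drop n)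
    (he : pvEndTag <+: r.drop j) (hlt : n < j) (hcon : j < n + 13) : False := by
  have hd : r.drop j = (r.drop n).drop (j - n) := by
    rw [List.drop_drop]; congr 1; omega
  rw [hd] at he
  obtain ⟨t1, ht1⟩ := hs
  obtain ⟨t2, ht2⟩ := he
  have e1 : (r.drop n)[j - n]? = pvStartTag[j - n]? := by
    rw [← ht1, List.getElem?_append_left (by simp [pvStartTag]; omega)]
  have e2 : (r.drop n)[j - n]? = some '[' := by
    have h0 : ((r.drop n).drop (j - n))[0]? = some '[' := by
      rw [← ht2, List.getElem?_append_left (by decide)]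
      decide
    rw [List.getElem?_drop] at h0
    simpa using h0
  have hfin : pvStartTag[j - n]? = some '[' := by rw [← e1, e2]
  have hrange : 1 ≤ j - n ∧ j - n ≤ 12 := by omega
  obtain ⟨ha, hb⟩ := hrange
  revert hfin
  generalize (j - n) = d at ha hb
  interval_cases d <;> decide

theorem pv_overlap2 {r : List Char} {n j : Nat} (hs : pvStartTag <+: r.drop n)
    (he : pvEndTag <+: r.drop j) (hlt : j < n) (hcon : n < j + 14) : False := by
  have hd : r.drop n = (r.drop j).drop (n - j) := by
    rw [List.drop_drop]; congr 1; omega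
  rw [hd] at hs
  obtain ⟨t2, ht2⟩ := he
  obtain ⟨t1, ht1⟩ := hs
  have e1 : (r.drop j)[n - j]? = pvEndTag[n - j]? := by
    rw [← ht2, List.getElem?_append_left (by simp [pvEndTag]; omega)]
  have e2 : (r.drop j)[n - j]? = some '[' := by
    have h0 : ((r.drop j).drop (n - j))[0]? = some '[' := by
      rw [← ht1, List.getElem?_append_left (by decide)]
      decide
    rw [List.getElem?_drop] at h0
    simpa using h0
  have hfin : pvEndTag[n - j]? = some '[' := by rw [← e1, e2]
  have hrange : 1 ≤ n - j ∧ n - j ≤ 13 := by omega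
  obtain ⟨ha, hb⟩ := hrange
  revert hfin
  generalize (n - j) = d at ha hb
  interval_cases d <;> decide

-- ---- B's algorithm, proof-side: a recursive characterisation of the split, and the per-piece note ----

def pvSplit (l : List Char) : List (List Char) :=
  if h : PySem.Chars.find l pvEndTag = -1 then [l]
  else l.take (PySem.Chars.find l pvEndTag).toNat
        :: pvSplit (l.drop ((PySem.Chars.find l pvEndTag).toNat + 14))
termination_by l.length
decreasing_by
  have h0 : 0 ≤ PySem.Chars.find l pvEndTag := by
    have := PySem.Chars.neg_one_le_find l pvEndTag; omega
  have hlen := (PySem.Chars.find_spec h0).1.length_le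
  have e2 : pvEndTag.length = 14 := by decide
  simp [List.length_drop, e2] at hlen ⊢
  omega

theorem pvSplit_ne_nil (l : List Char) : pvSplit l ≠ [] := by
  rw [pvSplit]; split <;> simp

def pvNote (p : List Char) : Option (List Char) :=
  if PySem.Chars.find p pvStartTag = -1 then none
  else some (p.drop ((PySem.Chars.find p pvStartTag).toNat + 13))

theorem pvLoopB_nil_of_no_start {l : List Char} (h : PySem.Chars.find l pvStartTag = -1) :
    pvLoopB l = [] := by
  rw [pvLoopB]; simp [pvPartition, h]

theorem pv_part_start {l : List Char} {nn : Nat}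
    (hn : PySem.Chars.find l pvStartTag = (nn : Int)) :
    pvPartition l pvStartTag = (l.take nn, pvStartTag, l.drop (nn + 13)) := by
  unfold pvPartition
  rw [hn, if_neg (by omega)]
  simp [show pvStartTag.length = 13 from by decide]

theorem pvLoopB_eq (N : Nat) : ∀ l : List Char, l.length ≤ N →
    pvLoopB l = List.filterMap pvNote (pvSplit l).dropLast := by
  induction N with
  | zero =>
    intro l hl
    have hnil : l = [] := by cases l with | nil => rfl | cons a t => simp at hl
    subst hnil
    rw [pvSplit, dif_pos (by decide)]
    simp only [List.dropLast, List.filterMap_nil]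
    exact pvLoopB_nil_of_no_start (by decide)
  | succ N ih =>
    intro l hl
    have e1 : pvStartTag.length = 13 := by decide
    have e2 : pvEndTag.length = 14 := by decide
    by_cases hj : PySem.Chars.find l pvEndTag = -1
    · rw [pvSplit, dif_pos hj]
      simp only [List.dropLast, List.filterMap_nil]
      by_cases hn : PySem.Chars.find l pvStartTag = -1
      · exact pvLoopB_nil_of_no_start hn
      · have hn0 : 0 ≤ PySem.Chars.find l pvStartTag := by
          have := PySem.Chars.neg_one_le_find l pvStartTag; omega
        obtain ⟨nn, hn'⟩ : ∃ m : Nat, PySem.Chars.find l pvStartTag = (m : Int) :=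
          ⟨_, (Int.toNat_of_nonneg hn0).symm⟩
        rw [pvLoopB]
        simp only [pv_part_start hn']
        rw [if_neg (show ¬ (pvStartTag = ([] : List Char)) by decide)]
        simp [pvPartition, pv_find_drop_none (nn + 13) hj]
    · have hj0 : 0 ≤ PySem.Chars.find l pvEndTag := by
        have := PySem.Chars.neg_one_le_find l pvEndTag; omega
      obtain ⟨jn, hjn⟩ : ∃ m : Nat, PySem.Chars.find l pvEndTag = (m : Int) :=
        ⟨_, (Int.toNat_of_nonneg hj0).symm⟩
      have spec_e : pvEndTag <+: l.drop jn := by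
        have := (PySem.Chars.find_spec hj0).1
        rw [hjn] at this; simpa using this
      have hjlen : jn + 14 ≤ l.length := by
        have := spec_e.length_le
        simp [List.length_drop, e2] at this
        omega
      have IH := ih (l.drop (jn + 14)) (by simp [List.length_drop]; omega)
      have hsplit : pvSplit l = l.take jn :: pvSplit (l.drop (jn + 14)) := by
        rw [pvSplit, dif_neg (by omega)]
        rw [hjn]
        simp
      rw [hsplit, List.dropLast_cons_of_ne_nil (pvSplit_ne_nil _), List.filterMap_cons]
      by_cases hn : PySem.Chars.find l pvStartTag = -1
      · have h1 : pvNote (l.take jn) = none := by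
          unfold pvNote
          rw [pv_find_take_none1 jn hn]
          simp
        rw [h1, ← IH, pvLoopB_nil_of_no_start hn,
          pvLoopB_nil_of_no_start (pv_find_drop_none (jn + 14) hn)]
      · have hn0 : 0 ≤ PySem.Chars.find l pvStartTag := by
          have := PySem.Chars.neg_one_le_find l pvStartTag; omega
        obtain ⟨nn, hn'⟩ : ∃ m : Nat, PySem.Chars.find l pvStartTag = (m : Int) :=
          ⟨_, (Int.toNat_of_nonneg hn0).symm⟩
        have spec_s : pvStartTag <+: l.drop nn := by
          have := (PySem.Chars.find_spec hn0).1
          rw [hn'] at this; simpa using this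
        rcases Nat.lt_trichotomy nn jn with hlt | heq | hgt
        · -- the opening tag sits inside this piece: both sides emit the same note
          have hle : nn + 13 ≤ jn := by
            by_contra hc; exact pv_overlap1 spec_s spec_e hlt (by omega)
          have hnote : pvNote (l.take jn) =
              some (List.take (jn - (nn + 13)) (l.drop (nn + 13))) := by
            unfold pvNote
            rw [pv_find_take hn' (by omega)]
            rw [if_neg (by omega)]
            rw [List.drop_take]
            simp
          have hfd : PySem.Chars.find (l.drop (nn + 13)) pvEndTag =
              ((jn - (nn + 13) : Nat) : Int) := pv_find_drop hjn (by omega)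
          have hpart2 : pvPartition (l.drop (nn + 13)) pvEndTag =
              (List.take (jn - (nn + 13)) (l.drop (nn + 13)), pvEndTag, l.drop (jn + 14)) := by
            unfold pvPartition
            rw [hfd, if_neg (by omega)]
            simp only [Int.toNat_natCast, e2, List.drop_drop]
            rw [show nn + 13 + (jn - (nn + 13) + 14) = jn + 14 from by omega]
          rw [pvLoopB]
          simp only [pv_part_start hn']
          rw [if_neg (show ¬ (pvStartTag = ([] : List Char)) by decide)]
          simp only [hpart2]
          rw [if_neg (show ¬ (pvEndTag = ([] : List Char)) by decide)]
          rw [hnote, IH]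
        · exact absurd spec_s (fun hs => pv_not_both hs (heq ▸ spec_e))
        · -- the first opening tag lies beyond this piece: both sides skip it
          have hge : jn + 14 ≤ nn := by
            by_contra hc; exact pv_overlap2 spec_s spec_e hgt (by omega)
          have hnote : pvNote (l.take jn) = none := by
            unfold pvNote
            rw [pv_find_take_none2 (by decide) hn' (by omega)]
            simp
          rw [hnote, ← IH]
          have hfs : PySem.Chars.find (l.drop (jn + 14)) pvStartTag =
              ((nn - (jn + 14) : Nat) : Int) := pv_find_drop hn' hge
          have hpart1' : pvPartition (l.drop (jn + 14)) pvStartTag =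
              ((l.drop (jn + 14)).take (nn - (jn + 14)), pvStartTag, l.drop (nn + 13)) := by
            rw [pv_part_start hfs]
            simp only [List.drop_drop]
            rw [show jn + 14 + (nn - (jn + 14) + 13) = nn + 13 from by omega]
          rw [pvLoopB]
          conv_rhs => rw [pvLoopB]
          simp only [pv_part_start hn', hpart1']

-- ---- Python's str.split(sep) (PySem.Chars.splitOn) computes pvSplit for our separator ----

theorem pv_go_eq (fuel : Nat) : ∀ (l cur : List Char) (acc : List (List Char)),
    l.length ≤ fuel →
    PySem.Chars.splitOn.go pvEndTag fuel l cur acc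
      = acc.reverse ++ (cur.reverse ++ (pvSplit l).headI) :: (pvSplit l).tail := by
  induction fuel with
  | zero =>
    intro l cur acc hl
    have hnil : l = [] := by cases l with | nil => rfl | cons a t => simp at hl
    subst hnil
    rw [PySem.Chars.splitOn.go.eq_def]
    rw [pvSplit, dif_pos (by decide)]
    simp
  | succ fuel ih =>
    intro l cur acc hl
    cases l with
    | nil =>
      rw [PySem.Chars.splitOn.go.eq_def]
      rw [pvSplit, dif_pos (by decide)]
      simp
    | cons c rest =>
      rw [PySem.Chars.splitOn.go.eq_def]
      by_cases hpre : pvEndTag.isPrefixOf (c :: rest)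
      · simp only [hpre, if_true]
        have hprefix : pvEndTag <+: (c :: rest) := List.isPrefixOf_iff_prefix.1 hpre
        have hpl : 14 ≤ (c :: rest).length := by
          have := hprefix.length_le
          rw [show pvEndTag.length = 14 from by decide] at this
          simpa using this
        have ihh := ih (List.drop pvEndTag.length (c :: rest)) [] (cur.reverse :: acc)
          (by
            simp [List.length_drop, show pvEndTag.length = 14 from by decide] at hl ⊢
            omega)
        rw [ihh]
        have hsplit : pvSplit (c :: rest) = [] :: pvSplit (List.drop 14 (c :: rest)) := by
          rw [pvSplit, dif_neg (by rw [pv_find_zero hprefix]; omega)]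
          rw [pv_find_zero hprefix]
          simp
        rw [hsplit]
        obtain ⟨a, t, hat⟩ := List.exists_cons_of_ne_nil (pvSplit_ne_nil (List.drop 14 (c :: rest)))
        rw [show pvEndTag.length = 14 from by decide, hat]
        simp
      · simp only [hpre, if_false, Bool.false_eq_true]
        have hprefix : ¬ pvEndTag <+: (c :: rest) := fun h =>
          hpre (List.isPrefixOf_iff_prefix.2 h)
        have ihh := ih rest (c :: cur) acc (by simp at hl; omega)
        rw [ihh]
        by_cases hm : PySem.Chars.find rest pvEndTag = -1
        · have h1 : pvSplit rest = [rest] := by rw [pvSplit, dif_pos hm]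
          have h2 : pvSplit (c :: rest) = [c :: rest] := by
            rw [pvSplit, dif_pos (pv_find_cons_none hprefix hm)]
          rw [h1, h2]
          simp
        · have hm0 : 0 ≤ PySem.Chars.find rest pvEndTag := by
            have := PySem.Chars.neg_one_le_find rest pvEndTag; omega
          obtain ⟨m, hm'⟩ : ∃ k : Nat, PySem.Chars.find rest pvEndTag = (k : Int) :=
            ⟨_, (Int.toNat_of_nonneg hm0).symm⟩
          have hc : PySem.Chars.find (c :: rest) pvEndTag = ((m + 1 : Nat) : Int) :=
            pv_find_cons_succ hprefix hm'
          have h1 : pvSplit rest = rest.take m :: pvSplit (rest.drop (m + 14)) := by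
            rw [pvSplit, dif_neg (by omega)]
            rw [hm']
            simp
          have h2 : pvSplit (c :: rest) =
              (c :: rest.take m) :: pvSplit (rest.drop (m + 14)) := by
            rw [pvSplit, dif_neg (by omega)]
            rw [hc]
            simp only [Int.toNat_natCast, List.take_succ_cons]
            rw [show m + 1 + 14 = (m + 14) + 1 from by omega, List.drop_succ_cons]
          rw [h1, h2]
          obtain ⟨a, t, hat⟩ := List.exists_cons_of_ne_nil (pvSplit_ne_nil (rest.drop (m + 14)))
          rw [hat]
          simp

theorem pv_splitOn_eq (l : List Char) : PySem.Chars.splitOn l pvEndTag = pvSplit l := by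
  show PySem.Chars.splitOn.go pvEndTag (l.length + 1) l [] [] = pvSplit l
  rw [pv_go_eq (l.length + 1) l [] [] (by omega)]
  obtain ⟨a, t, hat⟩ := List.exists_cons_of_ne_nil (pvSplit_ne_nil l)
  rw [hat]
  simp

-- ---- the foldl in the B port is the filterMap of pvNote ----

theorem pv_foldl_eq : ∀ (pieces : List (List Char)) (acc : List (List Char)),
    pieces.foldl (fun notes piece =>
      let idx := PySem.Chars.find piece pvStartTag
      if idx ≠ -1 then
        notes ++ [PySem.Chars.slice piece (some (idx + (pvStartTag.length : Int))) none]
      else notes) acc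
    = acc ++ pieces.filterMap pvNote := by
  intro pieces
  induction pieces with
  | nil => intro acc; simp
  | cons p t ihp =>
    intro acc
    simp only [List.foldl_cons]
    by_cases h : PySem.Chars.find p pvStartTag = -1
    · rw [if_neg (by simp [h])]
      rw [ihp]
      simp [pvNote, h]
    · have h0 : 0 ≤ PySem.Chars.find p pvStartTag := by
        have := PySem.Chars.neg_one_le_find p pvStartTag; omega
      obtain ⟨nn, hn'⟩ : ∃ k : Nat, PySem.Chars.find p pvStartTag = (k : Int) :=
        ⟨_, (Int.toNat_of_nonneg h0).symm⟩
      rw [if_pos (by simp [h])]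
      rw [ihp]
      have hslice : PySem.Chars.slice p
          (some (PySem.Chars.find p pvStartTag + (pvStartTag.length : Int))) none
          = p.drop (nn + 13) := by
        rw [hn', PySem.Chars.slice_eq_listSlice,
          show (nn : Int) + (pvStartTag.length : Int) = ((nn + 13 : Nat) : Int) from by
            rw [show pvStartTag.length = 13 from by decide]; push_cast; ring,
          PySem.List.slice_from (xs := p) (a := ((nn + 13 : Nat) : Int)) (by omega)]
        simp
        omega
      rw [hslice]
      have hnote : pvNote p = some (p.drop (nn + 13)) := by
        unfold pvNote
        rw [hn', if_neg (by omega)]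
        simp
      rw [List.filterMap_cons, hnote]
      simp

-- ===== VERDICT (by name: the statement is the Claim_ definition above) =====
theorem get_all_tagged_notes_spec : Claim_equal_get_all_tagged_notes := by
  intro s _
  unfold Spec_get_all_tagged_notes get_all_tagged_notes get_all_tagged_notes_alt
  have hA := loopA_eq_loopB (s.toList.length + 1) s.toList 0 (by omega) (by omega)
  simp only [Nat.cast_zero, PySem.Chars.findFrom_zero, List.drop_zero] at hA
  rw [hA, pvLoopB_eq s.toList.length s.toList (le_refl _), pv_splitOn_eq, pv_foldl_eq]
  simp
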